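-- pv_equiv track=rewrite | github.com/barkirsh/NLP_ASS1 | longest_ngram.py | find_all_segments
-- ===== SOURCE A (Python) =====
-- from collections import Counter
--
-- def find_all_segments(tokens, min_freq=2):
--     """
--     Find all segments where all tokens appear at least `min_freq` times.
--     """
--     token_freq = Counter(tokens)
--     segments = set()
--     current_segment = []
--
--     for token in tokens:
--         if token_freq[token] >= min_freq:
--             current_segment.append(token)
--         else:
--             if current_segment:
--                 segments.add(tuple(current_segment))
--                 current_segment = []
--     if current_segment:
--         segments.add(tuple(current_segment))
--
--     return segments
-- ===== SOURCE B (Python) =====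
-- from collections import Counter
--
-- def find_all_segments(tokens, min_freq=2):
--     """
--     Find all segments where all tokens appear at least `min_freq` times.
--     Two-pointer span scan: instead of accumulating/flushing a current list,
--     locate each maximal frequent run [i:j) directly and slice it out.
--     """
--     token_freq = Counter(tokens)
--     segments = set()
--     n = len(tokens)
--     i = 0
--     while i < n:
--         if token_freq[tokens[i]] >= min_freq:
--             j = i + 1
--             while j < n and token_freq[tokens[j]] >= min_freq:
--                 j += 1
--             segments.add(tuple(tokens[i:j]))
--             i = j
--         else:
--             i += 1
--     return segments
-- ===== Notes on version B (the rewrite author's own statement) =====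
-- stated objective: alternative
-- what changed: Replaced the accumulate-and-flush loop (growing a current_segment list and flushing it on infrequent tokens and at the end) with a two-pointer span scan that finds each maximal frequent run [i:j) and slices it out directly, with no accumulator and no final flush.
import Mathlib
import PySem

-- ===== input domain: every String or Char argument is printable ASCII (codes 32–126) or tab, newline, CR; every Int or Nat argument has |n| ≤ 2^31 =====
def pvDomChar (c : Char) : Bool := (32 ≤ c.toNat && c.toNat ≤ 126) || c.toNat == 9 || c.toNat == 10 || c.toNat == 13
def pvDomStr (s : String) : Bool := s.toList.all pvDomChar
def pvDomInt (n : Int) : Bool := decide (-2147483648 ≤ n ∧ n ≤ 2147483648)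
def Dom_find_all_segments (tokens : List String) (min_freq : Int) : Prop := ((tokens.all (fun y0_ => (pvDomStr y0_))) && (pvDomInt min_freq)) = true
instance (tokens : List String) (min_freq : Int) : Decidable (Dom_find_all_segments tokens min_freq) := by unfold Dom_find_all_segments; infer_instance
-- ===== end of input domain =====

-- B replaces A's accumulate-and-flush pass with a two-pointer span scan over maximal frequent runs (alternative decomposition, same cost).


-- ===== PORT A =====
-- A: count, then a single pass appending frequent tokens to current_segment and
-- flushing it into the set at each infrequent token and once at the end.
def find_all_segments (tokens : List String) (min_freq : Int) : List (List String) :=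
  let token_freq := PySem.Dict.counter tokens
  let st := tokens.foldl
    (fun (st : PySem.Set (List String) × List String) token =>
      if token_freq.getD token 0 ≥ min_freq then (st.1, st.2 ++ [token])
      else if st.2 ≠ [] then (PySem.Set.add st.1 st.2, ([] : List String))
      else (st.1, ([] : List String)))
    (PySem.Set.empty, ([] : List String))
  if st.2 ≠ [] then PySem.Set.add st.1 st.2 else st.1

-- ===== PORT B =====
-- B's while loop: skip an infrequent token, or take the maximal frequent span
-- starting here (inner j-scan = takeWhile, i := j = dropWhile) and add its slice.
def pvAltLoop (p : String → Bool) (s : PySem.Set (List String)) : List String → PySem.Set (List String)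
  | [] => s
  | t :: ts =>
      if p t then pvAltLoop p (PySem.Set.add s (t :: ts.takeWhile p)) (ts.dropWhile p)
      else pvAltLoop p s ts
termination_by l => l.length
decreasing_by
  · exact Nat.lt_succ_of_le (ts.length_dropWhile_le p)
  · simp

def find_all_segments_alt (tokens : List String) (min_freq : Int) : List (List String) :=
  let token_freq := PySem.Dict.counter tokens
  pvAltLoop (fun t => decide (token_freq.getD t 0 ≥ min_freq)) PySem.Set.empty tokens

-- ===== PRECONDITION & SPEC =====
def Spec_find_all_segments (tokens : List String) (min_freq : Int) (out : List (List String)) : Prop := out = find_all_segments_alt tokens min_freq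
instance (tokens : List String) (min_freq : Int) (out : List (List String)) : Decidable (Spec_find_all_segments tokens min_freq out) := by unfold Spec_find_all_segments; infer_instance

-- ===== CLAIM (what is proved, stated in full; the proofs are below) =====
def Claim_equal_find_all_segments : Prop := ∀ (tokens : List String) (min_freq : Int), Dom_find_all_segments tokens min_freq → Spec_find_all_segments tokens min_freq (find_all_segments tokens min_freq)

-- ===== LEMMAS AND PROOFS =====

-- the list of maximal frequent runs (proof-side characterisation of both loops)
def pvGroups (p : String → Bool) : List String → List (List String)
  | [] => []
  | t :: ts =>
      if p t then (t :: ts.takeWhile p) :: pvGroups p (ts.dropWhile p)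
      else pvGroups p ts
termination_by l => l.length
decreasing_by
  · exact Nat.lt_succ_of_le (ts.length_dropWhile_le p)
  · simp

theorem pvAltLoop_eq (p : String → Bool) (l : List String) :
    ∀ s, pvAltLoop p s l = (pvGroups p l).foldl PySem.Set.add s := by
  induction l using pvGroups.induct p with
  | case1 => intro s; simp [pvAltLoop, pvGroups]
  | case2 t ts h ih =>
      intro s
      rw [pvAltLoop, pvGroups, if_pos h, if_pos h, ih]
      rfl
  | case3 t ts h ih =>
      intro s
      rw [pvAltLoop, pvGroups, if_neg h, if_neg h, ih]

theorem pvA_loop_eq (p : String → Bool) (rest : List String) :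
    ∀ (s : PySem.Set (List String)) (cur : List String),
      (let st := rest.foldl
          (fun (st : PySem.Set (List String) × List String) token =>
            if p token then (st.1, st.2 ++ [token])
            else if st.2 ≠ [] then (PySem.Set.add st.1 st.2, ([] : List String))
            else (st.1, ([] : List String)))
          (s, cur)
        if st.2 ≠ [] then PySem.Set.add st.1 st.2 else st.1) =
      (if cur = [] then pvGroups p rest
       else (cur ++ rest.takeWhile p) :: pvGroups p (rest.dropWhile p)).foldl PySem.Set.add s := by
  induction rest with
  | nil =>
      intro s cur
      by_cases hc : cur = [] <;> simp [pvGroups, hc]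
  | cons t ts ih =>
      intro s cur
      by_cases h : p t = true
      · simp only [List.foldl_cons, h, if_pos]
        rw [ih s (cur ++ [t])]
        have hne : cur ++ [t] ≠ [] := by simp
        by_cases hc : cur = []
        · subst hc
          simp [pvGroups, h]
        · simp [hc, hne, h]
      · simp only [List.foldl_cons, h, Bool.false_eq_true, if_false]
        by_cases hc : cur = []
        · subst hc
          simp only [ne_eq, not_true_eq_false, if_neg, not_false_eq_true]
          rw [ih s []]
          simp [pvGroups, h]
        · simp only [hc, ne_eq, not_false_eq_true, if_pos]
          rw [ih (PySem.Set.add s cur) []]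
          simp [pvGroups, h]

-- ===== VERDICT (by name: the statement is the Claim_ definition above) =====
theorem find_all_segments_spec : Claim_equal_find_all_segments := by
  intro tokens min_freq _
  unfold Spec_find_all_segments find_all_segments find_all_segments_alt
  rw [pvAltLoop_eq]
  have := pvA_loop_eq (fun t => decide ((PySem.Dict.counter tokens).getD t 0 ≥ min_freq))
      tokens PySem.Set.empty []
  simp only [decide_eq_true_eq] at this
  simpa using this
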